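-- pv_equiv track=rewrite | github.com/zengtianli/stations | audiobook/app/tts.py | map_sentences_to_blocks
-- ===== SOURCE A (Python) =====
-- def map_sentences_to_blocks(
--     text_blocks: list[dict], sentences: list[dict],
-- ) -> list[list[dict]]:
--     """将 TTS 句子映射回段落块"""
--     full_text = "\n\n".join(b["text"] for b in text_blocks)
--     offset = 0
--     ranges = []
--     for b in text_blocks:
--         s = offset
--         e = offset + len(b["text"])
--         ranges.append((s, e))
--         offset = e + 2
--
--     result: list[list[dict]] = [[] for _ in text_blocks]
--     search_from = 0
--     for sent in sentences:
--         pos = full_text.find(sent["text"], search_from)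
--         if pos == -1:
--             pos = full_text.find(sent["text"])
--         if pos == -1:
--             result[-1].append(sent)
--             continue
--         search_from = pos + len(sent["text"])
--         assigned = False
--         for i, (bs, be) in enumerate(ranges):
--             if pos >= bs and pos < be + 2:
--                 result[i].append(sent)
--                 assigned = True
--                 break
--         if not assigned:
--             result[-1].append(sent)
--     return result
-- ===== SOURCE B (Python) =====
-- def _bisect_right(a, x):
--     lo, hi = 0, len(a)
--     while lo < hi:
--         mid = (lo + hi) // 2
--         if x < a[mid]:
--             hi = mid
--         else:
--             lo = mid + 1
--     return lo
--
--
-- def map_sentences_to_blocks(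
--     text_blocks: list[dict], sentences: list[dict],
-- ) -> list[list[dict]]:
--     """将 TTS 句子映射回段落块 (binary search over block start offsets)"""
--     texts = [b["text"] for b in text_blocks]
--     full_text = "\n\n".join(texts)
--     starts = []
--     offset = 0
--     for t in texts:
--         starts.append(offset)
--         offset += len(t) + 2
--
--     result: list[list[dict]] = [[] for _ in texts]
--     last = len(result) - 1
--     search_from = 0
--     for sent in sentences:
--         stext = sent["text"]
--         pos = full_text.find(stext, search_from)
--         if pos == -1:
--             pos = full_text.find(stext)
--         if pos == -1:
--             result[last].append(sent)
--             continue
--         search_from = pos + len(stext)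
--         result[_bisect_right(starts, pos) - 1].append(sent)
--     return result
-- ===== Notes on version B (the rewrite author's own statement) =====
-- stated objective: alternative
-- what changed: B replaces A's per-sentence linear scan over the (start,end) block ranges with a hand-written bisect_right binary search over the list of block start offsets, so the block index is computed in O(log n) per sentence instead of O(n).
import Mathlib
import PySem

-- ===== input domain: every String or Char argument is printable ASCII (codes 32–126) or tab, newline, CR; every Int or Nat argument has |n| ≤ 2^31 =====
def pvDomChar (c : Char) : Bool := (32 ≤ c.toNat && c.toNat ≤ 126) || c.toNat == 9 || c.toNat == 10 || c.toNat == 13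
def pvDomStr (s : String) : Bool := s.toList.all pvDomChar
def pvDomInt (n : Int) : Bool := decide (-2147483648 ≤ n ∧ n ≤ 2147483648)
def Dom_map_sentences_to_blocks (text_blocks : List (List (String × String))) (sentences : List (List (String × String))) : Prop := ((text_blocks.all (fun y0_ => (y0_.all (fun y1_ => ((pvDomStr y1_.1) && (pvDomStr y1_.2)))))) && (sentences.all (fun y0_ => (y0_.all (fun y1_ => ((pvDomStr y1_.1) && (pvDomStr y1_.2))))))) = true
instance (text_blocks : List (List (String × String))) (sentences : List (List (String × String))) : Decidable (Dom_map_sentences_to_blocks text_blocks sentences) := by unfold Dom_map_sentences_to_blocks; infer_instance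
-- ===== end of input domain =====

-- B replaces A's linear scan over the block ranges by a binary search over the block
-- start offsets (objective: alternative/faster inner lookup); return values agree on Pre_.

-- ===== PORT A =====
-- b["text"] (KeyError when missing is excluded by Pre_); shared by both ports, as both Pythons write b["text"]
def pvText (d : List (String × String)) : String := (PySem.Dict.get? (⟨d⟩ : PySem.Dict String String) "text").getD ""

-- the inner 'for i, (bs, be) in enumerate(ranges): if pos >= bs and pos < be + 2: … break'
def pvScanRanges (pos : Int) : List (Int × Int) → Option Nat
  | [] => none
  | (bs, be) :: rest => if bs ≤ pos ∧ pos < be + 2 then some 0 else (pvScanRanges pos rest).map (· + 1)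

def pvStepA (full_text : String) (ranges : List (Int × Int))
    (st : Int × List (List (List (String × String)))) (sent : List (String × String)) :
    Int × List (List (List (String × String))) :=
  let stext := pvText sent
  let pos0 := PySem.Str.findFrom full_text stext st.1
  let pos := if pos0 = -1 then PySem.Str.find full_text stext else pos0
  if pos = -1 then (st.1, st.2.modify (st.2.length - 1) (· ++ [sent]))   -- result[-1].append(sent); continue
  else
    match pvScanRanges pos ranges with
    | some i => (pos + PySem.Str.len stext, st.2.modify i (· ++ [sent]))
    | none => (pos + PySem.Str.len stext, st.2.modify (st.2.length - 1) (· ++ [sent]))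

def map_sentences_to_blocks (text_blocks : List (List (String × String))) (sentences : List (List (String × String))) : List (List (List (String × String))) :=
  let full_text := PySem.Str.join "\n\n" (text_blocks.map pvText)
  let ranges := (text_blocks.foldl
    (fun (st : Int × List (Int × Int)) b =>
      (st.1 + PySem.Str.len (pvText b) + 2, st.2 ++ [(st.1, st.1 + PySem.Str.len (pvText b))]))
    (0, [])).2
  let result : List (List (List (String × String))) := text_blocks.map (fun _ => [])
  (sentences.foldl (pvStepA full_text ranges) (0, result)).2

-- ===== PORT B =====
-- hand-written bisect_right: 'lo, hi = 0, len(a); while lo < hi: mid = (lo+hi)//2; …'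
def pvBisectRightLoop (a : List Int) (x : Int) : Nat → Nat → Nat → Nat
  | 0, lo, _ => lo
  | fuel + 1, lo, hi =>
    if lo < hi then
      match a[(lo + hi) / 2]? with
      | some y => if x < y then pvBisectRightLoop a x fuel lo ((lo + hi) / 2)
                  else pvBisectRightLoop a x fuel ((lo + hi) / 2 + 1) hi
      | none => lo    -- unreachable: lo < hi ≤ a.length keeps the index in range
    else lo

def pvBisectRight (a : List Int) (x : Int) : Nat := pvBisectRightLoop a x a.length 0 a.length

def pvStepB (full_text : String) (starts : List Int) (last : Nat)
    (st : Int × List (List (List (String × String)))) (sent : List (String × String)) :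
    Int × List (List (List (String × String))) :=
  let stext := pvText sent
  let pos0 := PySem.Str.findFrom full_text stext st.1
  let pos := if pos0 = -1 then PySem.Str.find full_text stext else pos0
  if pos = -1 then (st.1, st.2.modify last (· ++ [sent]))
  else (pos + PySem.Str.len stext, st.2.modify (pvBisectRight starts pos - 1) (· ++ [sent]))

def map_sentences_to_blocks_alt (text_blocks : List (List (String × String))) (sentences : List (List (String × String))) : List (List (List (String × String))) :=
  let texts := text_blocks.map pvText
  let full_text := PySem.Str.join "\n\n" texts
  let starts := (texts.foldl
    (fun (ac : Int × List Int) t => (ac.1 + PySem.Str.len t + 2, ac.2 ++ [ac.1])) (0, [])).2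
  let result : List (List (List (String × String))) := texts.map (fun _ => [])
  let last := result.length - 1
  (sentences.foldl (pvStepB full_text starts last) (0, result)).2

-- ===== PRECONDITION & SPEC =====
-- Pre_ excludes exactly the inputs where Python A raises: a KeyError when a block or
-- sentence dict lacks the "text" key, and the IndexError from result[-1] when
-- text_blocks is empty but sentences is not.
def Pre_map_sentences_to_blocks (text_blocks : List (List (String × String))) (sentences : List (List (String × String))) : Prop :=
  (∀ b ∈ text_blocks, (PySem.Dict.get? (⟨b⟩ : PySem.Dict String String) "text").isSome = true) ∧
  (∀ s ∈ sentences, (PySem.Dict.get? (⟨s⟩ : PySem.Dict String String) "text").isSome = true) ∧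
  (sentences = [] ∨ text_blocks ≠ [])
instance (text_blocks : List (List (String × String))) (sentences : List (List (String × String))) : Decidable (Pre_map_sentences_to_blocks text_blocks sentences) := by unfold Pre_map_sentences_to_blocks; infer_instance

def pvWitness_map_sentences_to_blocks : (List (List (String × String))) × (List (List (String × String))) :=
  ([[("text", "Hello world.")], [("text", "Bye now.")]],
   [[("text", "Hello world.")], [("text", "Bye")]])

def Spec_map_sentences_to_blocks (text_blocks : List (List (String × String))) (sentences : List (List (String × String))) (out : List (List (List (String × String)))) : Prop := out = map_sentences_to_blocks_alt text_blocks sentences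
instance (text_blocks : List (List (String × String))) (sentences : List (List (String × String))) (out : List (List (List (String × String)))) : Decidable (Spec_map_sentences_to_blocks text_blocks sentences out) := by unfold Spec_map_sentences_to_blocks; infer_instance

-- ===== CLAIM (what is proved, stated in full; the proofs are below) =====
def Claim_equal_map_sentences_to_blocks : Prop := ∀ (text_blocks : List (List (String × String))) (sentences : List (List (String × String))), Dom_map_sentences_to_blocks text_blocks sentences → Pre_map_sentences_to_blocks text_blocks sentences → Spec_map_sentences_to_blocks text_blocks sentences (map_sentences_to_blocks text_blocks sentences)

-- ===== LEMMAS AND PROOFS =====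

-- the block geometry, as plain recursions (proof-side only)
def pvOff (o : Int) : List Int → Int
  | [] => o
  | l :: t => pvOff (o + l + 2) t

def pvRangesR (o : Int) : List Int → List (Int × Int)
  | [] => []
  | l :: t => (o, o + l) :: pvRangesR (o + l + 2) t

def pvStartsR (o : Int) : List Int → List Int
  | [] => []
  | l :: t => o :: pvStartsR (o + l + 2) t

lemma pv_foldA_ranges (tb : List (List (String × String))) : ∀ (o : Int) (acc : List (Int × Int)),
    tb.foldl (fun (st : Int × List (Int × Int)) b =>
      (st.1 + PySem.Str.len (pvText b) + 2, st.2 ++ [(st.1, st.1 + PySem.Str.len (pvText b))])) (o, acc)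
    = (pvOff o (tb.map (fun b => PySem.Str.len (pvText b))),
       acc ++ pvRangesR o (tb.map (fun b => PySem.Str.len (pvText b)))) := by
  induction tb with
  | nil => simp [pvOff, pvRangesR]
  | cons h t ih =>
    intro o acc
    rw [List.foldl_cons, ih]
    simp [pvOff, pvRangesR]

lemma pv_foldB_starts (ts : List String) : ∀ (o : Int) (acc : List Int),
    ts.foldl (fun (ac : Int × List Int) t => (ac.1 + PySem.Str.len t + 2, ac.2 ++ [ac.1])) (o, acc)
    = (pvOff o (ts.map PySem.Str.len), acc ++ pvStartsR o (ts.map PySem.Str.len)) := by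
  induction ts with
  | nil => simp [pvOff, pvStartsR]
  | cons h t ih =>
    intro o acc
    rw [List.foldl_cons, ih]
    simp [pvOff, pvStartsR]

lemma pv_startsR_ge (ls : List Int) : ∀ o, (∀ l ∈ ls, 0 ≤ l) → ∀ x ∈ pvStartsR o ls, o ≤ x := by
  induction ls with
  | nil => simp [pvStartsR]
  | cons l t ih =>
    intro o hnn x hx
    simp only [pvStartsR, List.mem_cons] at hx
    rcases hx with rfl | hx
    · exact le_refl _
    · have := ih (o + l + 2) (fun l hl => hnn l (List.mem_cons_of_mem _ hl)) x hx
      have h0 : 0 ≤ l := hnn l List.mem_cons_self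
      omega

lemma pv_startsR_sorted (ls : List Int) : ∀ o, (∀ l ∈ ls, 0 ≤ l) →
    (pvStartsR o ls).Pairwise (· ≤ ·) := by
  induction ls with
  | nil => simp [pvStartsR]
  | cons l t ih =>
    intro o hnn
    have h0 : 0 ≤ l := hnn l List.mem_cons_self
    have hnnt : ∀ l ∈ t, 0 ≤ l := fun l hl => hnn l (List.mem_cons_of_mem _ hl)
    refine List.Pairwise.cons ?_ (ih (o + l + 2) hnnt)
    intro x hx
    have := pv_startsR_ge t (o + l + 2) hnnt x hx
    omega

-- my hand-ported bisect loop is PySem's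
lemma pv_bisect_loop_eq (a : List Int) (x : Int) : ∀ (f lo hi : Nat),
    pvBisectRightLoop a x f lo hi = PySem.List.bisectRightLoop a x f lo hi := by
  intro f
  induction f with
  | zero => intro lo hi; rfl
  | succ f ih =>
    intro lo hi
    simp only [pvBisectRightLoop, PySem.List.bisectRightLoop]
    split
    · cases h : a[(lo + hi) / 2]? with
      | none => simp
      | some y => simp only; split <;> simp [ih]
    · rfl

lemma pv_countP_of_split {α : Type} (P : α → Bool) : ∀ (a : List α) (r : Nat), r ≤ a.length →
    (∀ j (hj : j < a.length), j < r → P a[j]) → (∀ j (hj : j < a.length), r ≤ j → ¬ P a[j]) →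
    a.countP P = r := by
  intro a
  induction a with
  | nil => intro r hr _ _; simpa using (hr.antisymm (Nat.zero_le r)).symm
  | cons h t ih =>
    intro r hr h1 h2
    cases r with
    | zero =>
      have hh : ¬ P h := h2 0 (by simp) (Nat.zero_le _)
      rw [List.countP_cons]
      have ht : t.countP P = 0 := ih 0 (Nat.zero_le _) (by omega) (fun j hj _ => by
        have := h2 (j + 1) (by simpa using Nat.succ_lt_succ hj) (Nat.zero_le _)
        simpa using this)
      simp [ht, hh]
    | succ r =>
      have hh : P h := h1 0 (by simp) (Nat.succ_pos r)
      rw [List.countP_cons]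
      have ht : t.countP P = r := ih r (by simpa using hr)
        (fun j hj hjr => by
          have := h1 (j + 1) (by simpa using Nat.succ_lt_succ hj) (by omega)
          simpa using this)
        (fun j hj hjr => by
          have := h2 (j + 1) (by simpa using Nat.succ_lt_succ hj) (by omega)
          simpa using this)
      simp [ht, hh]

lemma pv_bisect_eq_countP (a : List Int) (x : Int) (hs : a.Pairwise (· ≤ ·)) :
    pvBisectRight a x = a.countP (fun s => decide (s ≤ x)) := by
  obtain ⟨hle, h1, h2⟩ := PySem.List.bisectRight_spec a x hs
  have heq : pvBisectRight a x = PySem.List.bisectRight a x := by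
    unfold pvBisectRight PySem.List.bisectRight
    exact pv_bisect_loop_eq a x a.length 0 a.length
  rw [heq]
  exact (pv_countP_of_split _ a _ hle (fun j hj hjr => by simpa using h1 j hj hjr)
    (fun j hj hjr => by simpa using not_le.mpr (h2 j hj hjr))).symm

lemma pv_scan_char (ls : List Int) : ∀ (o pos : Int), ls ≠ [] → (∀ l ∈ ls, 0 ≤ l) →
    o ≤ pos → pos + 2 ≤ pvOff o ls →
    pvScanRanges pos (pvRangesR o ls) =
      some ((pvStartsR o ls).countP (fun s => decide (s ≤ pos)) - 1) := by
  induction ls with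
  | nil => intro o pos h; exact absurd rfl h
  | cons l t ih =>
    intro o pos _ hnn ho hend
    have h0 : 0 ≤ l := hnn l List.mem_cons_self
    have hnnt : ∀ l ∈ t, 0 ≤ l := fun l hl => hnn l (List.mem_cons_of_mem _ hl)
    simp only [pvRangesR, pvStartsR, pvScanRanges, List.countP_cons, decide_eq_true_eq]
    by_cases hlt : pos < o + l + 2
    · have hc : o ≤ pos ∧ pos < o + l + 2 := ⟨ho, hlt⟩
      rw [if_pos hc]
      have hz : (pvStartsR (o + l + 2) t).countP (fun s => decide (s ≤ pos)) = 0 := by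
        rw [List.countP_eq_zero]
        intro x hx
        have := pv_startsR_ge t (o + l + 2) hnnt x hx
        simp only [decide_eq_true_eq]; omega
      simp [hz, ho]
    · rw [if_neg (by omega)]
      cases t with
      | nil => simp only [pvOff] at hend; omega
      | cons l2 t2 =>
        rw [ih (o + l + 2) pos (by simp) hnnt (by omega) (by simpa [pvOff] using hend)]
        have hpos1 : 1 ≤ (pvStartsR (o + l + 2) (l2 :: t2)).countP (fun s => decide (s ≤ pos)) := by
          have hle2 : (o + l + 2 : Int) ≤ pos := by omega
          rw [pvStartsR, List.countP_cons]
          simp [hle2]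
        simp only [Option.map_some]
        congr 1
        simp only [ho, if_pos]
        omega

lemma pv_off_add (ls : List Int) : ∀ (o c : Int), pvOff (o + c) ls = pvOff o ls + c := by
  induction ls with
  | nil => intro o c; simp [pvOff]
  | cons l t ih => intro o c; simp only [pvOff]; rw [show o + c + l + 2 = (o + l + 2) + c by ring, ih]

-- length of '\n\n'.join(ps) as an offset
lemma pv_join_len (ps : List String) (h : ps ≠ []) :
    ((PySem.Chars.join "\n\n".toList (ps.map String.toList)).length : Int)
      = pvOff 0 (ps.map PySem.Str.len) - 2 := by
  induction ps with
  | nil => exact absurd rfl h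
  | cons p t ih =>
    cases t with
    | nil =>
      simp [PySem.Chars.join_singleton, pvOff, PySem.Str.len_eq]
    | cons q t2 =>
      rw [List.map_cons, List.map_cons, PySem.Chars.join_cons_cons]
      have := ih (by simp)
      simp only [List.map_cons, show "\n\n".toList = ['\n', '\n'] from rfl] at this
      simp only [List.length_append, List.map_cons, pvOff, show "\n\n".toList = ['\n', '\n'] from rfl]
      push_cast
      rw [this]
      simp only [pvOff]
      rw [show (0 + PySem.Str.len p + 2 + PySem.Str.len q + 2 : Int)
            = (0 + PySem.Str.len q + 2) + (PySem.Str.len p + 2) by ring, pv_off_add]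
      simp only [PySem.Str.len_eq, List.length_cons, List.length_nil]
      push_cast
      rw [show (0 + (q.toList.length : Int) + 2 + ((p.toList.length : Int) + 2))
            = (0 + (q.toList.length : Int)) + ((p.toList.length : Int) + 4) by ring,
          pv_off_add]
      ring_nf
      rw [show (4 + (p.toList.length : Int) + (q.toList.length : Int))
            = 0 + (4 + (p.toList.length : Int) + (q.toList.length : Int)) by ring,
          pv_off_add]
      ring

-- s.find(sub, k) is -1 or an index into s
lemma pv_findFrom_bound (s sub : List Char) (k : Int) :
    PySem.Chars.findFrom s sub k = -1 ∨
    (0 ≤ PySem.Chars.findFrom s sub k ∧ PySem.Chars.findFrom s sub k ≤ (s.length : Int)) := by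
  simp only [PySem.Chars.findFrom]
  set n : Int := (s.length : Int) with hn
  by_cases he : n < (if k < 0 then if k + n < 0 then 0 else k + n else k)
  · rw [if_pos he]; left; rfl
  · rw [if_neg he]
    set st : Int := (if k < 0 then if k + n < 0 then 0 else k + n else k) with hst
    have hst0 : 0 ≤ st := by
      rw [hst]; split_ifs with h1 h2 <;> omega
    set r := PySem.Chars.find (List.drop st.toNat (List.take n.toNat s)) sub with hr
    by_cases hr1 : r = -1
    · rw [if_pos hr1]; left; rfl
    · rw [if_neg hr1]
      right
      have hrge : -1 ≤ r := PySem.Chars.neg_one_le_find _ _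
      have hrle : r ≤ ((List.drop st.toNat (List.take n.toNat s)).length : Int) :=
        PySem.Chars.find_le_length _ _
      have hlen : ((List.drop st.toNat (List.take n.toNat s)).length : Int) = n - st := by
        simp only [List.length_drop, List.length_take]
        have hnn : n.toNat = s.length := by omega
        rw [hnn]
        omega
      rw [hlen] at hrle
      constructor <;> omega

lemma pv_stepB_len (ft : String) (starts : List Int) (last : Nat)
    (st : Int × List (List (List (String × String)))) (sent : List (String × String)) :
    (pvStepB ft starts last st sent).2.length = st.2.length := by
  unfold pvStepB
  dsimp only
  split <;> (try split) <;> simp [List.length_modify]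

lemma pv_step_eq (tb : List (List (String × String))) (htb : tb ≠ [])
    (st : Int × List (List (List (String × String)))) (hlen : st.2.length = tb.length)
    (sent : List (String × String)) :
    pvStepA (PySem.Str.join "\n\n" (tb.map pvText))
        (pvRangesR 0 ((tb.map pvText).map PySem.Str.len)) st sent
      = pvStepB (PySem.Str.join "\n\n" (tb.map pvText))
        (pvStartsR 0 ((tb.map pvText).map PySem.Str.len)) (tb.length - 1) st sent := by
  unfold pvStepA pvStepB
  dsimp only
  set ft := PySem.Str.join "\n\n" (tb.map pvText) with hft
  set ls := (tb.map pvText).map PySem.Str.len with hls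
  set stext := pvText sent with hstext
  set pos0 := PySem.Str.findFrom ft stext st.1 with hpos0
  set pos := if pos0 = -1 then PySem.Str.find ft stext else pos0 with hpos
  by_cases hneg : pos = -1
  · rw [if_pos hneg, if_pos hneg, hlen]
  · rw [if_neg hneg, if_neg hneg]
    have hnn : ∀ l ∈ ls, 0 ≤ l := by
      intro l hl
      rw [hls] at hl
      obtain ⟨t, _, rfl⟩ := List.mem_map.mp hl
      simp [PySem.Str.len_eq]
    have hlsne : ls ≠ [] := by
      rw [hls]; simpa using htb
    have hftlen : ((ft.toList.length : Int)) = pvOff 0 ls - 2 := by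
      rw [hft, PySem.Str.toList_join, hls]
      rw [pv_join_len (tb.map pvText) (by simpa using htb)]
    have hbounds : 0 ≤ pos ∧ pos ≤ (ft.toList.length : Int) := by
      rw [hpos]
      by_cases h0 : pos0 = -1
      · rw [if_pos h0]
        have hne : PySem.Str.find ft stext ≠ -1 := by
          rw [hpos, if_pos h0] at hneg; exact hneg
        rw [PySem.Str.find_eq] at hne ⊢
        have := PySem.Chars.neg_one_le_find ft.toList stext.toList
        have := PySem.Chars.find_le_length ft.toList stext.toList
        omega
      · rw [if_neg h0]
        have hne : pos0 ≠ -1 := h0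
        rw [hpos0, PySem.Str.findFrom_eq] at hne ⊢
        rcases pv_findFrom_bound ft.toList stext.toList st.1 with h | h
        · exact absurd h hne
        · exact h
    have hend : pos + 2 ≤ pvOff 0 ls := by omega
    rw [pv_scan_char ls 0 pos hlsne hnn hbounds.1 hend]
    dsimp only
    rw [pv_bisect_eq_countP _ pos (pv_startsR_sorted ls 0 hnn)]

lemma pv_fold_eq (tb : List (List (String × String))) (htb : tb ≠ [])
    (sents : List (List (String × String))) :
    ∀ (st : Int × List (List (List (String × String)))), st.2.length = tb.length →
    sents.foldl (pvStepA (PySem.Str.join "\n\n" (tb.map pvText))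
        (pvRangesR 0 ((tb.map pvText).map PySem.Str.len))) st
      = sents.foldl (pvStepB (PySem.Str.join "\n\n" (tb.map pvText))
        (pvStartsR 0 ((tb.map pvText).map PySem.Str.len)) (tb.length - 1)) st := by
  induction sents with
  | nil => intro st _; rfl
  | cons s t ih =>
    intro st hlen
    rw [List.foldl_cons, List.foldl_cons, pv_step_eq tb htb st hlen s]
    exact ih _ (by rw [pv_stepB_len]; exact hlen)

-- ===== VERDICT (by name: the statement is the Claim_ definition above) =====
theorem map_sentences_to_blocks_spec : Claim_equal_map_sentences_to_blocks := by
  intro tb sents _ hpre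
  obtain ⟨hb, hs, hns⟩ := hpre
  unfold Spec_map_sentences_to_blocks map_sentences_to_blocks map_sentences_to_blocks_alt
  dsimp only
  rw [pv_foldA_ranges tb 0 [], pv_foldB_starts (tb.map pvText) 0 []]
  simp only [List.nil_append, List.map_map, List.length_map, Function.comp_def]
  by_cases htb : tb = []
  · have hse : sents = [] := by
      rcases hns with h | h
      · exact h
      · exact absurd htb h
    subst hse
    simp
  · have hmapeq : (List.map (fun b => PySem.Str.len (pvText b)) tb)
        = (tb.map pvText).map PySem.Str.len := by simp [List.map_map]
    rw [hmapeq]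
    rw [pv_fold_eq tb htb sents (0, List.map (fun _ => []) tb) (by simp)]
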